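-- pv_equiv track=rewrite | github.com/dogewzy/checkio | house.py | house
-- ===== SOURCE A (Python) =====
-- def house(plan):
--     rows = [i for i in plan.split('\n') if i]
--
--     right = top = 0
--     left = len(rows[0])
--     bottom = len(rows)
--     area_flag = False
--     for y, row in enumerate(rows):
--         for x, item in enumerate(row):
--             if item == '#':
--                 area_flag = True
--                 if x < left:
--                     left = x
--                 if x > right:
--                     right = x
--                 if y > top:
--                     top = y
--                 if y < bottom:
--                     bottom = y
--     if not area_flag:
--         return 0
--     return (right - left + 1) * (top - bottom + 1)
-- ===== SOURCE B (Python) =====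
-- def _trim(g):
--     # drop leading/trailing rows that contain no '#'
--     while g and '#' not in g[0]:
--         g = g[1:]
--     while g and '#' not in g[-1]:
--         g = g[:-1]
--     return g
--
--
-- def house(plan):
--     rows = [r for r in plan.split('\n') if r]
--     width = max(len(r) for r in rows)
--     grid = _trim([list(r.ljust(width)) for r in rows])
--     if not grid:
--         return 0
--     cols = _trim([list(c) for c in zip(*grid)])
--     return len(cols) * len(cols[0])
-- ===== Notes on version B (the rewrite author's own statement) =====
-- stated objective: alternative
-- what changed: B computes the area by cropping: it pads the lines to a rectangle, strips blank border rows, transposes the grid, strips blank border columns and multiplies the two remaining dimensions, instead of A's single scan maintaining four running min/max extremes per '#' cell.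
-- intended difference: On plans whose every '#' lies at a column index greater than the length of the first nonempty row, A's left edge stays stuck at its initial value len(rows[0]) and A returns a too-large area (e.g. '.\n..#' -> 2), while B returns the true bounding-box area (1), which is the intended value. — e.g. on house(".\n..#"): A returns 2, B returns 1
import Mathlib
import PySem

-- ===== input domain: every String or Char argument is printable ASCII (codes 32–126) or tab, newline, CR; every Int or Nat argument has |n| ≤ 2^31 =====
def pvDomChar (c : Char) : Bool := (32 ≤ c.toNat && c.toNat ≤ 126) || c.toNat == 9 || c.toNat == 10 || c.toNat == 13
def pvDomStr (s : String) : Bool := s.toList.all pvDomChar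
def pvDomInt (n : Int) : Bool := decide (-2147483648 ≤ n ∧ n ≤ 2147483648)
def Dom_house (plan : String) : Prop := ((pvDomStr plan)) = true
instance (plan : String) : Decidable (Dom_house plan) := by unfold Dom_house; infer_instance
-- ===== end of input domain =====

-- B computes the area by CROPPING: pad the rows to a rectangle, strip blank border rows,
-- transpose, strip blank border columns, and multiply the two remaining dimensions — no
-- per-cell extreme tracking at all (alternative decomposition, same cost).
-- Shared first line of both programs: the nonempty lines of the plan.
def pvRows (plan : String) : List String :=
  ((PySem.Str.split? plan "\n").getD []).filter (fun r => r != "")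

-- ===== PORT A =====
structure HState where
  right : Int
  top : Int
  left : Int
  bottom : Int
  flag : Bool
deriving DecidableEq, Repr

def houseInner (y : Int) (s : HState) (xc : Int × Char) : HState :=
  if xc.2 = '#' then
    let s1 := { s with flag := true }
    let s2 := if xc.1 < s1.left then { s1 with left := xc.1 } else s1
    let s3 := if xc.1 > s2.right then { s2 with right := xc.1 } else s2
    let s4 := if y > s3.top then { s3 with top := y } else s3
    if y < s4.bottom then { s4 with bottom := y } else s4
  else s

def house (plan : String) : Int :=
  let rows := pvRows plan
  match rows with
  | [] => 0  -- Python raises IndexError here (len(rows[0])); excluded by Pre_house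
  | r0 :: rest =>
    let init : HState :=
      { right := 0, top := 0, left := PySem.Str.len r0,
        bottom := ((r0 :: rest).length : Int), flag := false }
    let st := (PySem.List.enumerate (r0 :: rest) 0).foldl
      (fun s yr => (PySem.List.enumerate yr.2.toList 0).foldl (houseInner yr.1) s) init
    if st.flag = false then 0
    else (st.right - st.left + 1) * (st.top - st.bottom + 1)

-- ===== PORT B =====
-- '#' in row
def pvKeep (r : List Char) : Bool := r.contains '#'

-- Source B's _trim: the front while-loop is dropWhile, the back pop-loop is dropWhile on the reverse
def pvTrimG {α : Type} (p : α → Bool) (l : List α) : List α :=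
  ((l.dropWhile (fun a => !p a)).reverse.dropWhile (fun a => !p a)).reverse

-- width = max(len(r) for r in rows)
def pvWidth (rows : List String) : Nat :=
  (rows.map (fun r => r.toList.length)).foldl Nat.max 0

-- [list(r.ljust(width)) for r in rows]
def pvPadGrid (rows : List String) : List (List Char) :=
  rows.map (fun r => r.toList ++ List.replicate (pvWidth rows - r.toList.length) ' ')

-- zip(*g): stops at the first exhausted row (rows here all have equal length)
def pvZipAux : List Char → List (List Char) → List (List Char)
  | [], _ => []
  | c :: cr, rs =>
    if rs.all (fun row => !row.isEmpty) then
      (c :: rs.map (fun row => row.headD ' ')) :: pvZipAux cr (rs.map List.tail)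
    else []

def pvZip : List (List Char) → List (List Char)
  | [] => []
  | r :: rs => pvZipAux r rs

def house_alt (plan : String) : Int :=
  match pvRows plan with
  | [] => 0  -- Python raises ValueError here (max over no rows); excluded by Pre_house
  | r0 :: rest =>
    match pvTrimG pvKeep (pvPadGrid (r0 :: rest)) with
    | [] => 0
    | g0 :: gs =>
      let cols := pvTrimG pvKeep (pvZip (g0 :: gs))
      (cols.length : Int) * ((cols.headD []).length : Int)

-- ===== PRECONDITION & SPEC =====
-- Pre_ excludes exactly the plans with no nonempty line: there A raises IndexError on rows[0].
def Pre_house (plan : String) : Prop := pvRows plan ≠ []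
instance (plan : String) : Decidable (Pre_house plan) := by unfold Pre_house; infer_instance
def pvWitness_house : String := "..#\n.#."

-- On plans whose every '#' sits at a column index > len(first nonempty row), A's left edge
-- stays at its initial value len(rows[0]) and A returns a too-large area; B returns the true
-- bounding-box area, which is the intended value.
def D_house (plan : String) : Prop :=
  pvRows plan ≠ [] ∧ (∃ r ∈ pvRows plan, '#' ∈ r.toList) ∧
    ∀ r ∈ pvRows plan, ∀ p ∈ r.toList.zipIdx, p.1 = '#' →
      PySem.Str.len ((pvRows plan).headD "") < (p.2 : Int)
instance (plan : String) : Decidable (D_house plan) := by unfold D_house; infer_instance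

def Spec_house (plan : String) (out : Int) : Prop := ¬ D_house plan → out = house_alt plan
instance (plan : String) (out : Int) : Decidable (Spec_house plan out) := by
  unfold Spec_house; infer_instance

def pvDiffWitness_house : String := ".\n..#"
def pvDiffWitnessOut_house : Int × Int := (2, 1)

-- ===== CLAIM (what is proved, stated in full; the proofs are below) =====
def Claim_unchanged_house : Prop :=
  ∀ (plan : String), Dom_house plan → Pre_house plan → Spec_house plan (house plan)
def Claim_changed_house : Prop :=
  Dom_house (pvDiffWitness_house) ∧ Pre_house (pvDiffWitness_house) ∧ D_house (pvDiffWitness_house) ∧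
  house (pvDiffWitness_house) = pvDiffWitnessOut_house.1 ∧
  house_alt (pvDiffWitness_house) = pvDiffWitnessOut_house.2 ∧
  pvDiffWitnessOut_house.1 ≠ pvDiffWitnessOut_house.2
def Claim_exact_house : Prop :=
  ∀ (plan : String), Dom_house plan → Pre_house plan → D_house plan →
    house plan ≠ house_alt plan

-- ===== LEMMAS AND PROOFS =====

-- the marks (coordinate list) both analyses are phrased through
def pvMarks (rows : List String) : List (Int × Int) :=
  (PySem.List.enumerate rows 0).flatMap (fun yr =>
    (PySem.List.enumerate yr.2.toList 0).filterMap (fun xc =>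
      if xc.2 = '#' then some (xc.1, yr.1) else none))

-- A's mark-processing update, and its fold shape
def markStep (s : HState) (m : Int × Int) : HState :=
  let s1 := { s with flag := true }
  let s2 := if m.1 < s1.left then { s1 with left := m.1 } else s1
  let s3 := if m.1 > s2.right then { s2 with right := m.1 } else s2
  let s4 := if m.2 > s3.top then { s3 with top := m.2 } else s3
  if m.2 < s4.bottom then { s4 with bottom := m.2 } else s4

theorem markStep_eq (s : HState) (m : Int × Int) :
    markStep s m = ⟨max s.right m.1, max s.top m.2, min s.left m.1, min s.bottom m.2, true⟩ := by
  cases s with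
  | mk r t l b f =>
    simp only [markStep]
    split_ifs <;> simp_all [max_def, min_def] <;> omega

theorem inner_eq (y : Int) (l : List (Int × Char)) (s : HState) :
    l.foldl (houseInner y) s =
      (l.filterMap (fun xc => if xc.2 = '#' then some (xc.1, y) else none)).foldl markStep s := by
  induction l generalizing s with
  | nil => rfl
  | cons a t ih =>
    by_cases h : a.2 = '#' <;> simp [houseInner, markStep, h, ih]

theorem outer_eq (e : List (Int × String)) (s : HState) :
    e.foldl (fun s yr => (PySem.List.enumerate yr.2.toList 0).foldl (houseInner yr.1) s) s =
      (e.flatMap (fun yr => (PySem.List.enumerate yr.2.toList 0).filterMap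
        (fun xc => if xc.2 = '#' then some (xc.1, yr.1) else none))).foldl markStep s := by
  induction e generalizing s with
  | nil => rfl
  | cons a t ih =>
    simp only [List.foldl_cons, List.flatMap_cons, List.foldl_append]
    rw [inner_eq]
    exact ih _

theorem fold_components (ms : List (Int × Int)) (s : HState) :
    ms.foldl markStep s =
      { right := ms.foldl (fun a m => max a m.1) s.right,
        top := ms.foldl (fun a m => max a m.2) s.top,
        left := ms.foldl (fun a m => min a m.1) s.left,
        bottom := ms.foldl (fun a m => min a m.2) s.bottom,
        flag := s.flag || !ms.isEmpty } := by
  induction ms generalizing s with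
  | nil => simp
  | cons m t ih =>
    rw [List.foldl_cons, markStep_eq, ih]
    simp

theorem foldl_max_init (t : List Int) (a b : Int) :
    t.foldl max (max a b) = max a (t.foldl max b) := by
  induction t generalizing b with
  | nil => rfl
  | cons x t ih => simpa [max_assoc] using ih (max b x)

theorem foldl_min_init (t : List Int) (a b : Int) :
    t.foldl min (min a b) = min a (t.foldl min b) := by
  induction t generalizing b with
  | nil => rfl
  | cons x t ih => simpa [min_assoc] using ih (min b x)

theorem foldl_min_le (t : List Int) (a : Int) :
    t.foldl min a ≤ a ∧ ∀ y ∈ t, t.foldl min a ≤ y := by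
  induction t generalizing a with
  | nil => simp
  | cons x t ih =>
    refine ⟨le_trans (ih (min a x)).1 (by omega), ?_⟩
    intro y hy
    rcases List.mem_cons.mp hy with h | h
    · rw [h]; exact le_trans (ih (min a x)).1 (by omega)
    · exact (ih (min a x)).2 y h

theorem lt_foldl_min (t : List Int) (a L : Int) (ha : L < a) (ht : ∀ y ∈ t, L < y) :
    L < t.foldl min a := by
  induction t generalizing a with
  | nil => exact ha
  | cons x t ih =>
    exact ih (min a x) (by have := ht x (by simp); omega) (fun y hy => ht y (by simp [hy]))

theorem foldl_min_mem (t : List Int) (a : Int) : t.foldl min a ∈ a :: t := by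
  induction t generalizing a with
  | nil => simp
  | cons x t ih =>
    rw [List.foldl_cons]
    rcases List.mem_cons.mp (ih (min a x)) with h' | h'
    · rw [h']
      rcases min_choice a x with hc | hc <;> rw [hc] <;> simp
    · simp [List.mem_cons, h']

theorem foldl_max_mem (t : List Int) (a : Int) : t.foldl max a ∈ a :: t := by
  induction t generalizing a with
  | nil => simp
  | cons x t ih =>
    rw [List.foldl_cons]
    rcases List.mem_cons.mp (ih (max a x)) with h' | h'
    · rw [h']
      rcases max_choice a x with hc | hc <;> rw [hc] <;> simp
    · simp [List.mem_cons, h']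

theorem nat_le_foldl_max (t : List Nat) (a : Nat) :
    a ≤ t.foldl Nat.max a ∧ ∀ y ∈ t, y ≤ t.foldl Nat.max a := by
  induction t generalizing a with
  | nil => simp
  | cons x t ih =>
    refine ⟨le_trans (Nat.le_max_left a x) (ih (Nat.max a x)).1, ?_⟩
    intro y hy
    rcases List.mem_cons.mp hy with h | h
    · rw [h]; exact le_trans (Nat.le_max_right a x) (ih (Nat.max a x)).1
    · exact (ih (Nat.max a x)).2 y h

-- characterization of membership in pvMarks
theorem mem_pvMarks (rows : List String) (m : Int × Int) :
    m ∈ pvMarks rows ↔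
      ∃ (j : Nat) (hj : j < rows.length) (k : Nat) (hk : k < (rows[j]).toList.length),
        m = ((k : Int), (j : Int)) ∧ (rows[j]).toList[k] = '#' := by
  simp only [pvMarks, List.mem_flatMap, List.mem_filterMap,
    PySem.List.mem_enumerate_iff]
  constructor
  · rintro ⟨yr, ⟨j, hj, rfl⟩, xc, ⟨k, hk, rfl⟩, hif⟩
    rw [Option.ite_none_right_eq_some, Option.some_inj] at hif
    exact ⟨j, hj, k, hk, by simp [← hif.2], hif.1⟩
  · rintro ⟨j, hj, k, hk, rfl, hc⟩
    exact ⟨((j : Int), rows[j]), ⟨j, hj, by simp⟩,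
      ((k : Int), (rows[j]).toList[k]), ⟨k, hk, by simp⟩, by simp [hc]⟩

theorem marks_y_lt (rows : List String) (m : Int × Int) (h : m ∈ pvMarks rows) :
    0 ≤ m.1 ∧ 0 ≤ m.2 ∧ m.2 < (rows.length : Int) := by
  rw [mem_pvMarks] at h
  obtain ⟨j, hj, k, hk, rfl, -⟩ := h
  simp; exact_mod_cast hj

theorem marks_x_lt (rows : List String) (m : Int × Int) (h : m ∈ pvMarks rows) :
    m.1 < (pvWidth rows : Int) := by
  rw [mem_pvMarks] at h
  obtain ⟨j, hj, k, hk, rfl, -⟩ := h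
  have hle : (rows[j]).toList.length ≤ pvWidth rows :=
    (nat_le_foldl_max _ _).2 _ (List.mem_map_of_mem (List.getElem_mem hj))
  simp only
  exact_mod_cast lt_of_lt_of_le hk hle

theorem marks_ne_iff (rows : List String) :
    pvMarks rows ≠ [] ↔ ∃ r ∈ rows, '#' ∈ r.toList := by
  constructor
  · intro h
    obtain ⟨m, hm⟩ := List.exists_mem_of_ne_nil _ h
    rw [mem_pvMarks] at hm
    obtain ⟨j, hj, k, hk, -, hc⟩ := hm
    exact ⟨rows[j], List.getElem_mem hj, hc ▸ List.getElem_mem hk⟩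
  · rintro ⟨r, hr, hc⟩
    obtain ⟨j, hj, rfl⟩ := List.getElem_of_mem hr
    obtain ⟨k, hk, hck⟩ := List.getElem_of_mem hc
    intro hnil
    have hmem : ((k : Int), (j : Int)) ∈ pvMarks rows :=
      (mem_pvMarks _ _).mpr ⟨j, hj, k, hk, rfl, hck⟩
    simp [hnil] at hmem

-- bridge: D_'s per-character condition says every mark's x exceeds L
theorem D_marks (plan : String) (hD : D_house plan) :
    ∀ m ∈ pvMarks (pvRows plan), PySem.Str.len ((pvRows plan).headD "") < m.1 := by
  obtain ⟨-, -, h⟩ := hD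
  intro m hm
  rw [mem_pvMarks] at hm
  obtain ⟨j, hj, k, hk, rfl, hc⟩ := hm
  exact h _ (List.getElem_mem hj) (((pvRows plan)[j]).toList[k], k)
    (List.mk_mem_zipIdx_iff_getElem?.mpr (by simp)) hc

theorem notD_marks (plan : String) (hpre : pvRows plan ≠ [])
    (hne : pvMarks (pvRows plan) ≠ []) (hD : ¬ D_house plan) :
    ∃ m ∈ pvMarks (pvRows plan), m.1 ≤ PySem.Str.len ((pvRows plan).headD "") := by
  unfold D_house at hD
  push_neg at hD
  obtain ⟨r, hr, p, hp, hc, hle⟩ := hD hpre ((marks_ne_iff _).mp hne)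
  obtain ⟨j, hj, rfl⟩ := List.getElem_of_mem hr
  have hget := List.mk_mem_zipIdx_iff_getElem?.mp hp
  have hk : p.2 < ((pvRows plan)[j]).toList.length := (List.getElem?_eq_some_iff.mp hget).1
  refine ⟨((p.2 : Int), (j : Int)), ?_, by simpa using hle⟩
  rw [mem_pvMarks]
  exact ⟨j, hj, p.2, hk, rfl, by have := (List.getElem?_eq_some_iff.mp hget).2; simp [this, hc]⟩

-- A's value as a function of the marks list (left edge still clipped at len(rows[0]))
theorem house_char (plan : String) (r0 : String) (rest : List String)
    (hrows : pvRows plan = r0 :: rest) (m : Int × Int) (ms : List (Int × Int))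
    (hmarks : pvMarks (r0 :: rest) = m :: ms) :
    house plan =
      ((ms.map (·.1)).foldl max m.1 - min (PySem.Str.len r0) ((ms.map (·.1)).foldl min m.1) + 1) *
      ((ms.map (·.2)).foldl max m.2 - (ms.map (·.2)).foldl min m.2 + 1) := by
  have hm0 := marks_y_lt (r0 :: rest) m (by rw [hmarks]; simp)
  have hx0 : (0 : Int) ≤ m.1 := hm0.1
  have hy0 : (0 : Int) ≤ m.2 := hm0.2.1
  have hyb : m.2 < ((r0 :: rest).length : Int) := hm0.2.2
  simp only [house, hrows]
  rw [outer_eq]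
  have hfm : ((PySem.List.enumerate (r0 :: rest) 0).flatMap
      (fun yr => (PySem.List.enumerate yr.2.toList 0).filterMap
        (fun xc => if xc.2 = '#' then some (xc.1, yr.1) else none))) = pvMarks (r0 :: rest) := rfl
  rw [hfm, hmarks, fold_components]
  simp only [List.isEmpty_cons, Bool.not_false, Bool.or_true]
  have hrw : ∀ (f : Int × Int → Int) (i : Int) (op : Int → Int → Int),
      (m :: ms).foldl (fun a p => op a (f p)) i = (ms.map f).foldl op (op i (f m)) := by
    intro f i op
    rw [← List.foldl_map (f := f)]
    simp
  simp only [hrw]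
  rw [foldl_max_init, foldl_max_init, foldl_min_init, foldl_min_init]
  have hR : max 0 ((ms.map (·.1)).foldl max m.1) = (ms.map (·.1)).foldl max m.1 := by
    have := (PySem.List.le_foldl_max (ms.map (·.1)) m.1).1; omega
  have hT : max 0 ((ms.map (·.2)).foldl max m.2) = (ms.map (·.2)).foldl max m.2 := by
    have := (PySem.List.le_foldl_max (ms.map (·.2)) m.2).1; omega
  have hB : min ((r0 :: rest).length : Int) ((ms.map (·.2)).foldl min m.2)
      = (ms.map (·.2)).foldl min m.2 := by
    have := (foldl_min_le (ms.map (·.2)) m.2).1; omega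
  rw [hR, hT, hB]
  simp

-- ---------- B-side machinery ----------

-- dropWhile (not p) drops exactly the prefix before the first p-element
theorem dropWhile_not_eq_drop {α : Type} (p : α → Bool) (l : List α) :
    l.dropWhile (fun a => !p a) = l.drop (l.findIdx p) := by
  induction l with
  | nil => rfl
  | cons a t ih =>
    rw [List.dropWhile_cons, List.findIdx_cons]
    cases h : p a <;> simp [h, ih]

-- the trim removes exactly the slices outside [a, b], the first/last p-indices
theorem pvTrimG_char {α : Type} (p : α → Bool) (l : List α) (a b : Nat)
    (ha : a < l.length) (hb : b < l.length)
    (hpa : p (l[a]'ha) = true) (hpb : p (l[b]'hb) = true)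
    (hmin : ∀ (k : Nat) (hk : k < l.length), p (l[k]'hk) = true → a ≤ k)
    (hmax : ∀ (k : Nat) (hk : k < l.length), p (l[k]'hk) = true → k ≤ b) :
    pvTrimG p l = (l.drop a).take (b + 1 - a) := by
  have hab : a ≤ b := hmin b hb hpb
  have hfi : l.findIdx p = a := by
    have h1 : l.findIdx p ≤ a := by
      by_contra h
      push_neg at h
      have hfalse : p (l[a]'ha) = false := List.not_of_lt_findIdx (p := p) (xs := l) (i := a) h
      rw [hpa] at hfalse
      cases hfalse
    have hlt : l.findIdx p < l.length :=
      List.findIdx_lt_length_of_exists ⟨l[a], List.getElem_mem ha, hpa⟩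
    have h2 : a ≤ l.findIdx p := hmin _ hlt (List.findIdx_getElem (w := hlt))
    omega
  have hdw : l.dropWhile (fun x => !p x) = l.drop a := by
    rw [dropWhile_not_eq_drop, hfi]
  unfold pvTrimG
  rw [hdw, dropWhile_not_eq_drop]
  have hlen' : (l.drop a).length = l.length - a := List.length_drop
  have hrevget : ∀ (k : Nat) (hk : k < (l.drop a).reverse.length),
      (l.drop a).reverse[k] = l[l.length - 1 - k]'(by simp at hk; omega) := by
    intro k hk
    simp only [List.length_reverse, hlen'] at hk
    rw [List.getElem_reverse]
    rw [List.getElem_drop]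
    congr 1
    omega
  have hfi2 : (l.drop a).reverse.findIdx p = l.length - 1 - b := by
    have hkb : l.length - 1 - b < (l.drop a).reverse.length := by
      simp only [List.length_reverse, hlen']; omega
    have hpkb : p ((l.drop a).reverse[l.length - 1 - b]'hkb) = true := by
      rw [hrevget]
      have : l.length - 1 - (l.length - 1 - b) = b := by omega
      simp_rw [this]
      exact hpb
    have h1 : (l.drop a).reverse.findIdx p ≤ l.length - 1 - b := by
      by_contra h
      push_neg at h
      have hfalse : p ((l.drop a).reverse[l.length - 1 - b]'hkb) = false :=
        List.not_of_lt_findIdx (p := p) (xs := (l.drop a).reverse) (i := l.length - 1 - b) h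
      rw [hpkb] at hfalse
      cases hfalse
    have hlt2 : (l.drop a).reverse.findIdx p < (l.drop a).reverse.length :=
      List.findIdx_lt_length_of_exists
        ⟨(l.drop a).reverse[l.length - 1 - b], List.getElem_mem hkb, hpkb⟩
    have h2 : l.length - 1 - b ≤ (l.drop a).reverse.findIdx p := by
      have hp2 := List.findIdx_getElem (w := hlt2)
      rw [hrevget _ hlt2] at hp2
      have hle := hmax _ _ hp2
      simp only [List.length_reverse, hlen'] at hlt2
      omega
    omega
  rw [hfi2, List.drop_reverse, List.reverse_reverse, hlen']
  congr 1
  omega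

-- trim keeps every p-element
theorem pvTrimG_nil {α : Type} (p : α → Bool) (l : List α)
    (h : ∀ x ∈ l, p x = false) : pvTrimG p l = [] := by
  unfold pvTrimG
  have : l.dropWhile (fun a => !p a) = [] :=
    List.dropWhile_eq_nil_iff.mpr (fun x hx => by simp [h x hx])
  rw [this]
  rfl

-- getD through the space padding
theorem pad_getD (l : List Char) (w x : Nat) :
    (l ++ List.replicate (w - l.length) ' ').getD x ' ' =
      if h : x < l.length then l[x] else ' ' := by
  split_ifs with h
  · rw [List.getD_eq_getElem _ _ (by simp; omega)]
    rw [List.getElem_append_left h]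
  · by_cases h2 : x < l.length + (w - l.length)
    · rw [List.getD_eq_getElem _ _ (by simp; omega)]
      rw [List.getElem_append_right (by omega)]
      simp [List.getElem_replicate]
    · rw [List.getD_eq_default _ _ (by simp; omega)]

theorem tail_getD (l : List Char) (x : Nat) :
    l.tail.getD x ' ' = l.getD (x + 1) ' ' := by
  cases l <;> simp [List.getD]

theorem headD_eq_getD (l : List Char) : l.headD ' ' = l.getD 0 ' ' := by
  cases l <;> simp [List.getD]

-- zip(*g) on a rectangular grid is the list of columns
theorem pvZip_eq (w : Nat) (g : List (List Char)) (hg : g ≠ [])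
    (hlen : ∀ r ∈ g, r.length = w) :
    pvZip g = (List.range w).map (fun x => g.map (fun r => r.getD x ' ')) := by
  induction w generalizing g with
  | zero =>
    obtain ⟨r, rs, rfl⟩ := List.exists_cons_of_ne_nil hg
    have : r = [] := List.eq_nil_of_length_eq_zero (hlen r (by simp))
    subst this
    rfl
  | succ w ih =>
    obtain ⟨r, rs, rfl⟩ := List.exists_cons_of_ne_nil hg
    cases r with
    | nil => exact absurd (hlen [] (by simp)) (by simp)
    | cons c cr =>
      have hall : rs.all (fun row => !row.isEmpty) = true := by
        rw [List.all_eq_true]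
        intro row hrow
        have := hlen row (by simp [hrow])
        simp only [Bool.not_eq_true']
        rw [← Bool.not_eq_true, List.isEmpty_iff]
        intro hnil
        rw [hnil] at this
        simp at this
      have hl' : ∀ r ∈ cr :: rs.map List.tail, r.length = w := by
        intro r hr
        rcases List.mem_cons.mp hr with h | h
        · rw [h]
          have := hlen (c :: cr) (by simp)
          simpa using this
        · obtain ⟨r', hr', rfl⟩ := List.mem_map.mp h
          have := hlen r' (by simp [hr'])
          cases r' with
          | nil => simp at this
          | cons a t => simpa using this
      have hrec : pvZipAux cr (rs.map List.tail) = pvZip (cr :: rs.map List.tail) := rfl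
      simp only [pvZip, pvZipAux, hall, if_pos]
      rw [hrec, ih (cr :: rs.map List.tail) (by simp) hl']
      rw [List.range_succ_eq_map]
      simp only [List.map_cons, List.map_map]
      congr 1
      · simp only [List.getD_cons_zero]
        congr 1
        exact List.map_congr_left fun row _ => headD_eq_getD row
      · apply List.map_congr_left
        intro x _
        simp only [Function.comp, Nat.succ_eq_add_one, List.map_cons, List.map_map,
          List.getD_cons_succ]
        congr 1
        exact List.map_congr_left fun row _ => by simp [Function.comp, tail_getD]

-- B's value as a function of the marks list: the same closed form house_char produces for A,
-- without A's clip at len(rows[0])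
theorem house_alt_char (plan : String) (r0 : String) (rest : List String)
    (hrows : pvRows plan = r0 :: rest) (m : Int × Int) (ms : List (Int × Int))
    (hmarks : pvMarks (r0 :: rest) = m :: ms) :
    house_alt plan =
      ((ms.map (·.1)).foldl max m.1 - (ms.map (·.1)).foldl min m.1 + 1) *
      ((ms.map (·.2)).foldl max m.2 - (ms.map (·.2)).foldl min m.2 + 1) := by
  set rows := r0 :: rest with hrowsdef
  set n := rows.length with hn
  set w := pvWidth rows with hw
  set grid0 := pvPadGrid rows with hgrid0
  have h_len : grid0.length = n := by
    simp only [hgrid0, pvPadGrid, List.length_map, hn]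
  have h_rowlen : ∀ r ∈ grid0, r.length = w := by
    intro r hr
    obtain ⟨s, hs, rfl⟩ := List.mem_map.mp hr
    have hle : s.toList.length ≤ w :=
      (nat_le_foldl_max _ _).2 _ (List.mem_map_of_mem hs)
    rw [List.length_append, List.length_replicate, ← hw]
    omega
  -- the grid cell characterization
  have h_cell : ∀ (y x : Nat) (hy : y < n),
      ((grid0[y]'(by omega)).getD x ' ' = '#') ↔ ((x : Int), (y : Int)) ∈ pvMarks rows := by
    intro y x hy
    have hyg : y < grid0.length := by omega
    have hget : grid0[y]'hyg = (rows[y]'hy).toList ++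
        List.replicate (w - (rows[y]'hy).toList.length) ' ' := by
      simp [hgrid0, pvPadGrid, hw]
    rw [hget, pad_getD]
    rw [mem_pvMarks]
    constructor
    · intro h
      split_ifs at h with hx
      · exact ⟨y, hy, x, hx, rfl, h⟩
      · exact absurd h (by decide)
    · rintro ⟨j, hj, k, hk, hjk, hc⟩
      have h1 : ((x : Int), (y : Int)).1 = ((k : Int), (j : Int)).1 := congrArg Prod.fst hjk
      have h2 : ((x : Int), (y : Int)).2 = ((k : Int), (j : Int)).2 := congrArg Prod.snd hjk
      simp only at h1 h2
      have hk1 : k = x := by exact_mod_cast h1.symm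
      have hj1 : j = y := by exact_mod_cast h2.symm
      subst hk1; subst hj1
      rw [dif_pos hk]
      exact hc
  have h_keep : ∀ (y : Nat) (hy : y < n),
      (pvKeep (grid0[y]'(by omega)) = true) ↔ ∃ x : Nat, ((x : Int), (y : Int)) ∈ pvMarks rows := by
    intro y hy
    have hyg : y < grid0.length := by omega
    constructor
    · intro h
      have hmem : '#' ∈ grid0[y]'hyg := by
        simpa [pvKeep] using h
      obtain ⟨x, hx, hxe⟩ := List.getElem_of_mem hmem
      refine ⟨x, ?_⟩
      rw [← h_cell y x hy]
      rw [List.getD_eq_getElem _ _ hx]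
      exact hxe
    · rintro ⟨x, hx⟩
      rw [← h_cell y x hy] at hx
      have hxlt : x < (grid0[y]'hyg).length := by
        by_contra hge
        rw [List.getD_eq_default _ _ (by omega)] at hx
        exact absurd hx (by decide)
      rw [List.getD_eq_getElem _ _ hxlt] at hx
      simp only [pvKeep, List.contains_iff_mem]
      exact hx ▸ List.getElem_mem hxlt
  -- extreme values of the marks
  set minx := (ms.map (·.1)).foldl min m.1 with hminx
  set maxx := (ms.map (·.1)).foldl max m.1 with hmaxx
  set miny := (ms.map (·.2)).foldl min m.2 with hminy
  set maxy := (ms.map (·.2)).foldl max m.2 with hmaxy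
  have hmarks_mem : ∀ mk ∈ pvMarks rows, minx ≤ mk.1 ∧ mk.1 ≤ maxx ∧ miny ≤ mk.2 ∧ mk.2 ≤ maxy := by
    intro mk hmk
    rw [hmarks] at hmk
    rcases List.mem_cons.mp hmk with h | h
    · subst h
      exact ⟨(foldl_min_le _ _).1, (PySem.List.le_foldl_max _ _).1,
        (foldl_min_le _ _).1, (PySem.List.le_foldl_max _ _).1⟩
    · exact ⟨(foldl_min_le _ _).2 _ (List.mem_map_of_mem h),
        (PySem.List.le_foldl_max _ _).2 _ (List.mem_map_of_mem h),
        (foldl_min_le _ _).2 _ (List.mem_map_of_mem h),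
        (PySem.List.le_foldl_max _ _).2 _ (List.mem_map_of_mem h)⟩
  have hminx_mem : ∃ mk ∈ pvMarks rows, mk.1 = minx := by
    rcases List.mem_cons.mp (foldl_min_mem (ms.map (·.1)) m.1) with h | h
    · exact ⟨m, by rw [hmarks]; simp, h.symm⟩
    · obtain ⟨mk, hmk, he⟩ := List.mem_map.mp h
      exact ⟨mk, by rw [hmarks]; simp [hmk], he⟩
  have hmaxx_mem : ∃ mk ∈ pvMarks rows, mk.1 = maxx := by
    rcases List.mem_cons.mp (foldl_max_mem (ms.map (·.1)) m.1) with h | h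
    · exact ⟨m, by rw [hmarks]; simp, h.symm⟩
    · obtain ⟨mk, hmk, he⟩ := List.mem_map.mp h
      exact ⟨mk, by rw [hmarks]; simp [hmk], he⟩
  have hminy_mem : ∃ mk ∈ pvMarks rows, mk.2 = miny := by
    rcases List.mem_cons.mp (foldl_min_mem (ms.map (·.2)) m.2) with h | h
    · exact ⟨m, by rw [hmarks]; simp, h.symm⟩
    · obtain ⟨mk, hmk, he⟩ := List.mem_map.mp h
      exact ⟨mk, by rw [hmarks]; simp [hmk], he⟩
  have hmaxy_mem : ∃ mk ∈ pvMarks rows, mk.2 = maxy := by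
    rcases List.mem_cons.mp (foldl_max_mem (ms.map (·.2)) m.2) with h | h
    · exact ⟨m, by rw [hmarks]; simp, h.symm⟩
    · obtain ⟨mk, hmk, he⟩ := List.mem_map.mp h
      exact ⟨mk, by rw [hmarks]; simp [hmk], he⟩
  have hbounds : 0 ≤ minx ∧ maxx < (w : Int) ∧ 0 ≤ miny ∧ maxy < (n : Int) := by
    obtain ⟨mk1, hmk1, he1⟩ := hminx_mem
    obtain ⟨mk2, hmk2, he2⟩ := hmaxx_mem
    obtain ⟨mk3, hmk3, he3⟩ := hminy_mem
    obtain ⟨mk4, hmk4, he4⟩ := hmaxy_mem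
    have h1 := marks_y_lt rows mk1 hmk1
    have h2 := marks_x_lt rows mk2 hmk2
    have h4 := marks_y_lt rows mk4 hmk4
    exact ⟨he1 ▸ h1.1, he2 ▸ h2, he3 ▸ (marks_y_lt rows mk3 hmk3).2.1, he4 ▸ h4.2.2⟩
  have hxmm : minx ≤ maxx := le_trans (hmarks_mem m (by rw [hmarks]; simp)).1
    (hmarks_mem m (by rw [hmarks]; simp)).2.1
  have hymm : miny ≤ maxy := le_trans (hmarks_mem m (by rw [hmarks]; simp)).2.2.1
    (hmarks_mem m (by rw [hmarks]; simp)).2.2.2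
  set a := miny.toNat with hadef
  set b := maxy.toNat with hbdef
  have hacast : (a : Int) = miny := Int.toNat_of_nonneg hbounds.2.2.1
  have hbcast : (b : Int) = maxy := Int.toNat_of_nonneg (le_trans hbounds.2.2.1 hymm)
  have hbn : b < n := by omega
  have han : a < n := by omega
  -- mark y-value characterization of the keep-rows
  have h_keep_iff : ∀ (k : Nat) (hk : k < grid0.length),
      pvKeep (grid0[k]'hk) = true ↔ ∃ x : Nat, ((x : Int), (k : Int)) ∈ pvMarks rows := by
    intro k hk
    exact h_keep k (by omega)
  -- row trim
  have htrim1 : pvTrimG pvKeep grid0 = (grid0.drop a).take (b + 1 - a) := by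
    apply pvTrimG_char pvKeep grid0 a b (by omega) (by omega)
    · rw [h_keep_iff]
      obtain ⟨mk, hmk, he⟩ := hminy_mem
      have h0 := marks_y_lt rows mk hmk
      refine ⟨mk.1.toNat, ?_⟩
      have : ((mk.1.toNat : Int), (a : Int)) = mk := by
        have := Int.toNat_of_nonneg h0.1
        rw [this, hacast, ← he]
      rw [this]; exact hmk
    · rw [h_keep_iff]
      obtain ⟨mk, hmk, he⟩ := hmaxy_mem
      have h0 := marks_y_lt rows mk hmk
      refine ⟨mk.1.toNat, ?_⟩
      have : ((mk.1.toNat : Int), (b : Int)) = mk := by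
        have := Int.toNat_of_nonneg h0.1
        rw [this, hbcast, ← he]
      rw [this]; exact hmk
    · intro k hk hp
      rw [h_keep_iff] at hp
      obtain ⟨x, hx⟩ := hp
      have := (hmarks_mem _ hx).2.2.1
      simp only at this
      omega
    · intro k hk hp
      rw [h_keep_iff] at hp
      obtain ⟨x, hx⟩ := hp
      have := (hmarks_mem _ hx).2.2.2
      simp only at this
      omega
  set grid1 := (grid0.drop a).take (b + 1 - a) with hgrid1
  have hg1len : grid1.length = b + 1 - a := by
    simp [hgrid1]
    omega
  have hg1get : ∀ (k : Nat) (hk : k < grid1.length), grid1[k]'hk = grid0[a + k]'(by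
      simp [hg1len] at hk; omega) := by
    intro k hk
    simp only [hgrid1]
    rw [List.getElem_take, List.getElem_drop]
  have hg1rowlen : ∀ r ∈ grid1, r.length = w := by
    intro r hr
    rw [hgrid1] at hr
    exact h_rowlen r (List.mem_of_mem_drop (List.mem_of_mem_take hr))
  have hg1ne : grid1 ≠ [] := by
    rw [← List.length_pos_iff, hg1len]
    omega
  -- column characterization
  have h_col : ∀ (x : Nat),
      (pvKeep (grid1.map (fun r => r.getD x ' ')) = true) ↔
        ∃ y : Nat, ((x : Int), (y : Int)) ∈ pvMarks rows := by
    intro x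
    constructor
    · intro h
      have hmem : '#' ∈ grid1.map (fun r => r.getD x ' ') := by
        simpa [pvKeep, List.contains_iff_mem] using h
      obtain ⟨r, hr, he⟩ := List.mem_map.mp hmem
      obtain ⟨k, hk, rfl⟩ := List.getElem_of_mem hr
      rw [hg1get k hk] at he
      have hkn : a + k < n := by
        have := hk; rw [hg1len] at this; omega
      exact ⟨a + k, (h_cell (a + k) x hkn).mp he⟩
    · rintro ⟨y, hy⟩
      have hyab := (hmarks_mem _ hy).2.2
      simp only at hyab
      have hyn : y < n := by
        have := marks_y_lt rows _ hy
        simp only at this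
        omega
      have hyk : y - a < grid1.length := by rw [hg1len]; omega
      have : grid1[y - a]'hyk = grid0[y]'(by omega) := by
        rw [hg1get _ hyk]
        congr 1
        omega
      have hc := (h_cell y x hyn).mpr hy
      have hxlt : x < (grid0[y]'(by omega)).length := by
        by_contra hge
        rw [List.getD_eq_default _ _ (by omega)] at hc
        exact absurd hc (by decide)
      simp only [pvKeep, List.contains_iff_mem]
      rw [List.mem_map]
      refine ⟨grid1[y - a]'hyk, List.getElem_mem hyk, ?_⟩
      rw [this]
      exact hc
  -- the transpose
  set t := (List.range w).map (fun x => grid1.map (fun r => r.getD x ' ')) with ht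
  have hzip : pvZip grid1 = t := pvZip_eq w grid1 hg1ne hg1rowlen
  have htlen : t.length = w := by simp [ht]
  have htget : ∀ (x : Nat) (hx : x < t.length),
      t[x]'hx = grid1.map (fun r => r.getD x ' ') := by
    intro x hx
    simp [ht]
  set c := minx.toNat with hcdef
  set d := maxx.toNat with hddef
  have hccast : (c : Int) = minx := Int.toNat_of_nonneg hbounds.1
  have hdcast : (d : Int) = maxx := Int.toNat_of_nonneg (le_trans hbounds.1 hxmm)
  have hdw : d < w := by omega
  have hcw : c < w := by omega
  -- column trim
  have htrim2 : pvTrimG pvKeep t = (t.drop c).take (d + 1 - c) := by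
    apply pvTrimG_char pvKeep t c d (by omega) (by omega)
    · rw [htget c (by omega), h_col]
      obtain ⟨mk, hmk, he⟩ := hminx_mem
      have h0 := marks_y_lt rows mk hmk
      refine ⟨mk.2.toNat, ?_⟩
      have : ((c : Int), (mk.2.toNat : Int)) = mk := by
        have := Int.toNat_of_nonneg h0.2.1
        rw [this, hccast, ← he]
      rw [this]; exact hmk
    · rw [htget d (by omega), h_col]
      obtain ⟨mk, hmk, he⟩ := hmaxx_mem
      have h0 := marks_y_lt rows mk hmk
      refine ⟨mk.2.toNat, ?_⟩
      have : ((d : Int), (mk.2.toNat : Int)) = mk := by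
        have := Int.toNat_of_nonneg h0.2.1
        rw [this, hdcast, ← he]
      rw [this]; exact hmk
    · intro k hk hp
      rw [htget k hk, h_col] at hp
      obtain ⟨y, hy⟩ := hp
      have := (hmarks_mem _ hy).1
      simp only at this
      omega
    · intro k hk hp
      rw [htget k hk, h_col] at hp
      obtain ⟨y, hy⟩ := hp
      have := (hmarks_mem _ hy).2.1
      simp only at this
      omega
  -- assemble
  obtain ⟨g0, gs, hg⟩ := List.exists_cons_of_ne_nil hg1ne
  have hPad : pvTrimG pvKeep (pvPadGrid (r0 :: rest)) = g0 :: gs := by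
    rw [← hrowsdef, ← hgrid0]
    exact htrim1.trans hg
  simp only [house_alt, hrows, hrowsdef, hPad]
  rw [← hg, hzip, htrim2]
  have hclen : ((t.drop c).take (d + 1 - c)).length = d + 1 - c := by
    simp [htlen]
    omega
  have hcne : (t.drop c).take (d + 1 - c) ≠ [] := by
    rw [← List.length_pos_iff, hclen]
    omega
  obtain ⟨c0, cs, hcc⟩ := List.exists_cons_of_ne_nil hcne
  have hc0 : c0 = grid1.map (fun r => r.getD c ' ') := by
    have hdc : t.drop c = (t[c]'(by omega)) :: t.drop (c + 1) :=
      List.drop_eq_getElem_cons (by omega)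
    have hk2 : d + 1 - c = (d - c) + 1 := by omega
    have hcc2 : (t[c]'(by omega)) :: (t.drop (c + 1)).take (d - c) = c0 :: cs := by
      rw [← List.take_succ_cons, ← hdc, ← hk2]
      exact hcc
    have h0 : t[c]'(by omega) = c0 := (List.cons_eq_cons.mp hcc2).1
    rw [← h0, htget c (by omega)]
  rw [hcc]
  simp only [List.headD_cons]
  have hlen1 : ((c0 :: cs).length : Int) = maxx - minx + 1 := by
    have : (c0 :: cs).length = d + 1 - c := by rw [← hcc, hclen]
    rw [this]
    push_cast [Nat.cast_sub (by omega : c ≤ d + 1)]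
    omega
  have hlen2 : ((c0.length : Nat) : Int) = maxy - miny + 1 := by
    rw [hc0, List.length_map, hg1len]
    push_cast [Nat.cast_sub (by omega : a ≤ b + 1)]
    omega
  rw [hlen1, hlen2]

theorem house_alt_nil (plan : String) (r0 : String) (rest : List String)
    (hrows : pvRows plan = r0 :: rest) (hmarks : pvMarks (r0 :: rest) = []) :
    house_alt plan = 0 := by
  have hnone : ∀ r ∈ pvPadGrid (r0 :: rest), pvKeep r = false := by
    intro r hr
    obtain ⟨s, hs, rfl⟩ := List.mem_map.mp hr
    have hno : '#' ∉ s.toList := by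
      intro hmem
      have : pvMarks (r0 :: rest) ≠ [] := (marks_ne_iff _).mpr ⟨s, hs, hmem⟩
      exact this hmarks
    simp only [pvKeep]
    rw [Bool.eq_false_iff]
    intro hcon
    rw [List.contains_iff_mem, List.mem_append] at hcon
    rcases hcon with h | h
    · exact hno h
    · have := List.eq_of_mem_replicate h
      exact absurd this (by decide)
  have hempty := pvTrimG_nil pvKeep _ hnone
  simp only [house_alt, hrows]
  rw [hempty]

theorem house_spec' (plan : String) (hpre : Pre_house plan) (hD : ¬ D_house plan) :
    house plan = house_alt plan := by
  obtain ⟨r0, rest, hrows⟩ : ∃ r0 rest, pvRows plan = r0 :: rest := by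
    cases h : pvRows plan with
    | nil => exact absurd h hpre
    | cons a t => exact ⟨a, t, rfl⟩
  cases hmarks : pvMarks (r0 :: rest) with
  | nil =>
    -- no marks: A's flag stays false, both return 0
    rw [house_alt_nil plan r0 rest hrows hmarks]
    simp only [house, hrows]
    rw [outer_eq]
    have hfm : ((PySem.List.enumerate (r0 :: rest) 0).flatMap
        (fun yr => (PySem.List.enumerate yr.2.toList 0).filterMap
          (fun xc => if xc.2 = '#' then some (xc.1, yr.1) else none))) = pvMarks (r0 :: rest) := rfl
    rw [hfm, hmarks]
    simp
  | cons m ms =>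
    have hmarks' : pvMarks (pvRows plan) = m :: ms := by rw [hrows]; exact hmarks
    obtain ⟨mw, hmw, hmwle⟩ := notD_marks plan hpre (by rw [hmarks']; simp) hD
    rw [house_char plan r0 rest hrows m ms hmarks,
        house_alt_char plan r0 rest hrows m ms hmarks]
    rw [hrows, List.headD_cons] at hmwle
    -- the min over xs is ≤ len r0, so A's clip at len r0 is inactive
    have hmin : (ms.map (·.1)).foldl min m.1 ≤ PySem.Str.len r0 := by
      rw [hrows, hmarks] at hmw
      rcases List.mem_cons.mp hmw with h | h
      · calc (ms.map (·.1)).foldl min m.1 ≤ m.1 := (foldl_min_le _ _).1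
          _ ≤ _ := h ▸ hmwle
      · exact le_trans ((foldl_min_le (ms.map (·.1)) m.1).2 mw.1 (List.mem_map_of_mem h)) hmwle
    have : min (PySem.Str.len r0) ((ms.map (·.1)).foldl min m.1)
        = (ms.map (·.1)).foldl min m.1 := by omega
    rw [this]

theorem house_tight' (plan : String) (hpre : Pre_house plan) (hD : D_house plan) :
    house plan ≠ house_alt plan := by
  obtain ⟨r0, rest, hrows⟩ : ∃ r0 rest, pvRows plan = r0 :: rest := by
    cases h : pvRows plan with
    | nil => exact absurd h hpre
    | cons a t => exact ⟨a, t, rfl⟩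
  have hne : pvMarks (pvRows plan) ≠ [] := by
    rw [marks_ne_iff]
    obtain ⟨-, h, -⟩ := hD
    exact h
  cases hmarks : pvMarks (pvRows plan) with
  | nil => exact absurd hmarks hne
  | cons m ms =>
    have hall : ∀ p ∈ pvMarks (pvRows plan), PySem.Str.len r0 < p.1 := by
      intro p hp
      have := D_marks plan hD p hp
      rwa [hrows, List.headD_cons] at this
    rw [house_char plan r0 rest hrows m ms (by rw [← hrows]; exact hmarks),
        house_alt_char plan r0 rest hrows m ms (by rw [← hrows]; exact hmarks)]
    -- every mark's x exceeds len r0, so A's left edge is len r0 while B's is min xs > len r0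
    have hx0 : PySem.Str.len r0 < m.1 := hall m (by rw [hmarks]; simp)
    have hxt : ∀ y ∈ ms.map (·.1), PySem.Str.len r0 < y := by
      intro y hy
      obtain ⟨p, hp, rfl⟩ := List.mem_map.mp hy
      exact hall p (by rw [hmarks]; simp [hp])
    have hmin : PySem.Str.len r0 < (ms.map (·.1)).foldl min m.1 :=
      lt_foldl_min _ _ _ hx0 hxt
    have hclip : min (PySem.Str.len r0) ((ms.map (·.1)).foldl min m.1) = PySem.Str.len r0 := by
      omega
    rw [hclip]
    -- the height factor is ≥ 1, the width factors differ
    have hyle : (ms.map (·.2)).foldl min m.2 ≤ (ms.map (·.2)).foldl max m.2 :=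
      le_trans ((foldl_min_le _ _).1) ((PySem.List.le_foldl_max _ _).1)
    have hxle : (ms.map (·.1)).foldl min m.1 ≤ (ms.map (·.1)).foldl max m.1 :=
      le_trans ((foldl_min_le _ _).1) ((PySem.List.le_foldl_max _ _).1)
    intro hcon
    have h1 : (0:Int) < (ms.map (·.2)).foldl max m.2 - (ms.map (·.2)).foldl min m.2 + 1 := by omega
    nlinarith [hcon, h1, hmin, hxle]

-- ===== VERDICT (by name: the statement is the Claim_ definition above) =====
theorem house_spec : Claim_unchanged_house := by
  intro plan _ hpre hD
  exact house_spec' plan hpre hD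

theorem house_changed : Claim_changed_house := by
  unfold Claim_changed_house; decide

theorem house_tight : Claim_exact_house := by
  intro plan _ hpre hD
  exact house_tight' plan hpre hD
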